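-- pv_equiv track=rewrite | github.com/GundalaNikhil/DSA | dsa-problems/MathAdvanced/solutions/python/MTH-009-subset-convolution-and-or.py | subset_convolution_and_or
-- ===== SOURCE A (Python) =====
-- def subset_convolution_and_or(n: int, op: int, A: list[int], B: list[int]) -> list[int]:
--     MOD = 1000000007
--     size = 1 << n
--
--     def fzt_or(a, invert):
--         for i in range(n):
--             for mask in range(size):
--                 if mask & (1 << i):
--                     u = a[mask]
--                     v = a[mask ^ (1 << i)]
--                     if not invert:
--                         a[mask] = (u + v) % MOD
--                     else:
--                         a[mask] = (u - v + MOD) % MOD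
--
--     def fzt_and(a, invert):
--         for i in range(n):
--             for mask in range(size):
--                 if not (mask & (1 << i)):
--                     u = a[mask]
--                     v = a[mask ^ (1 << i)]
--                     if not invert:
--                         a[mask] = (u + v) % MOD
--                     else:
--                         a[mask] = (u - v + MOD) % MOD
--
--     if op == 1: # OR
--         fzt_or(A, False)
--         fzt_or(B, False)
--     else: # AND
--         fzt_and(A, False)
--         fzt_and(B, False)
--
--     C = [(A[i] * B[i]) % MOD for i in range(size)]
--
--     if op == 1: # OR
--         fzt_or(C, True)
--     else: # AND
--         fzt_and(C, True)
--
--     return C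
-- ===== SOURCE B (Python) =====
-- def subset_convolution_and_or(n: int, op: int, A: list[int], B: list[int]) -> list[int]:
--     # Direct set-summation formulation (no in-place butterflies; A and B are not mutated).
--     MOD = 1000000007
--     size = 1 << n
--     full = size - 1
--
--     def submasks(base):
--         # all submasks of base, built by doubling over the bit positions
--         out = [0]
--         for i in range(n):
--             if (base >> i) & 1:
--                 out = out + [t | (1 << i) for t in out]
--         return out
--
--     def region(mask):
--         # op==1: all submasks of mask; else: all supersets of mask (within `full`)
--         base = mask if op == 1 else full ^ mask
--         return [mask ^ t for t in submasks(base)]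
--
--     zA = [sum(A[j] for j in region(m)) % MOD for m in range(size)]
--     zB = [sum(B[j] for j in region(m)) % MOD for m in range(size)]
--     P = [zA[m] * zB[m] % MOD for m in range(size)]
--
--     out = []
--     for m in range(size):
--         acc = 0
--         for j in region(m):
--             if bin(m ^ j).count("1") % 2 == 0:
--                 acc = acc + P[j]
--             else:
--                 acc = acc - P[j]
--         out.append(acc % MOD)
--     return out
-- ===== Notes on version B (the rewrite author's own statement) =====
-- stated objective: alternative
-- what changed: Replaces the in-place butterfly zeta/Moebius (SOS) transforms with direct set-summation formulas: each transformed entry is computed as an explicit sum over the submask/superset region (enumerated by bit-doubling), with inclusion-exclusion signs from popcount parity; A and B are no longer mutated in place (return value is identical).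
import Mathlib
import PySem

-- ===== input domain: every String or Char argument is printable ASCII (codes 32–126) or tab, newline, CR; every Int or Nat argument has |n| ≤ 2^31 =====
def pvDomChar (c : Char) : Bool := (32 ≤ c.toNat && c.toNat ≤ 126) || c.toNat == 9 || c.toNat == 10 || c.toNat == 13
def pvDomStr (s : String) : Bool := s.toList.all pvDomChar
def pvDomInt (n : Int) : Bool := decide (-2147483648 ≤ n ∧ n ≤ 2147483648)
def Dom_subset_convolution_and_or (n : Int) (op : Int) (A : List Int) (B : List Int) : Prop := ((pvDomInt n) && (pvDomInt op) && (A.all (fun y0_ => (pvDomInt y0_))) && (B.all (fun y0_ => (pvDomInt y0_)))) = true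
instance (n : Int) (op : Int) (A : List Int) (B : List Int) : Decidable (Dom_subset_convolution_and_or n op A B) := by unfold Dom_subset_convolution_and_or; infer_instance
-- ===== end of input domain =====

-- B computes the same OR/AND subset convolution by direct set-summation formulas instead of A's
-- in-place butterfly SOS transforms; unlike A, B does not mutate the argument lists A and B in
-- place (the equivalence proved here is about the RETURN value, which is identical).

-- ===== PORT A =====
def pvM : Int := 1000000007

-- fzt_or and fzt_and differ only in the (negated) bit test; `orC = true` is fzt_or.
def pvHit (orC : Bool) (bit mask : Nat) : Bool := (mask &&& bit != 0) == orC

def pvFztStep (orC inv : Bool) (bit : Nat) (a : List Int) (mask : Nat) : List Int :=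
  if pvHit orC bit mask then
    let u := a.getD mask 0
    let v := a.getD (mask ^^^ bit) 0
    a.set mask (if inv then PySem.Int.mod (u - v + pvM) pvM else PySem.Int.mod (u + v) pvM)
  else a

def pvFzt (orC : Bool) (n : Nat) (a : List Int) (inv : Bool) : List Int :=
  (List.range n).foldl (fun acc i => (List.range (2 ^ n)).foldl (pvFztStep orC inv (2 ^ i)) acc) a

def subset_convolution_and_or (n : Int) (op : Int) (A : List Int) (B : List Int) : List Int :=
  let nn := n.toNat
  let size := 2 ^ nn
  let A1 := if op = 1 then pvFzt true nn A false else pvFzt false nn A false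
  let B1 := if op = 1 then pvFzt true nn B false else pvFzt false nn B false
  let C := (List.range size).map (fun i => PySem.Int.mod (A1.getD i 0 * B1.getD i 0) pvM)
  if op = 1 then pvFzt true nn C true else pvFzt false nn C true

-- ===== PORT B =====
def pvSubmasks (n base : Nat) : List Nat :=
  (List.range n).foldl
    (fun out i => if (base >>> i) &&& 1 != 0 then out ++ out.map (fun t => t ||| 2 ^ i) else out)
    [0]

def pvRegion (n : Nat) (op : Int) (full mask : Nat) : List Nat :=
  let base := if op = 1 then mask else full ^^^ mask
  (pvSubmasks n base).map (fun t => mask ^^^ t)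

-- port of bin(x).count("1")
def pvPopcount (x : Nat) : Nat :=
  if h : x = 0 then 0 else x % 2 + pvPopcount (x / 2)
decreasing_by exact Nat.div_lt_self (Nat.pos_of_ne_zero h) (by omega)

def subset_convolution_and_or_alt (n : Int) (op : Int) (A : List Int) (B : List Int) : List Int :=
  let nn := n.toNat
  let size := 2 ^ nn
  let full := size - 1
  let zA := (List.range size).map
    (fun m => PySem.Int.mod (((pvRegion nn op full m).map (fun j => A.getD j 0)).sum) pvM)
  let zB := (List.range size).map
    (fun m => PySem.Int.mod (((pvRegion nn op full m).map (fun j => B.getD j 0)).sum) pvM)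
  let P := (List.range size).map (fun m => PySem.Int.mod (zA.getD m 0 * zB.getD m 0) pvM)
  (List.range size).map (fun m =>
    PySem.Int.mod
      ((pvRegion nn op full m).foldl
        (fun acc j => if pvPopcount (m ^^^ j) % 2 = 0 then acc + P.getD j 0 else acc - P.getD j 0) 0)
      pvM)

-- ===== PRECONDITION & SPEC =====
-- Pre_ excludes exactly the inputs where Python A raises: n < 0 (1 << n raises ValueError) and
-- lists shorter than 2^n (IndexError).
def Pre_subset_convolution_and_or (n : Int) (op : Int) (A : List Int) (B : List Int) : Prop :=
  0 ≤ n ∧ 2 ^ n.toNat ≤ A.length ∧ 2 ^ n.toNat ≤ B.length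
instance (n : Int) (op : Int) (A : List Int) (B : List Int) : Decidable (Pre_subset_convolution_and_or n op A B) := by unfold Pre_subset_convolution_and_or; infer_instance

def pvWitness_subset_convolution_and_or : Int × Int × List Int × List Int := (1, 1, [1, 2], [3, 4])

def Spec_subset_convolution_and_or (n : Int) (op : Int) (A : List Int) (B : List Int) (out : List Int) : Prop := out = subset_convolution_and_or_alt n op A B
instance (n : Int) (op : Int) (A : List Int) (B : List Int) (out : List Int) : Decidable (Spec_subset_convolution_and_or n op A B out) := by unfold Spec_subset_convolution_and_or; infer_instance

-- ===== CLAIM (what is proved, stated in full; the proofs are below) =====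
def Claim_equal_subset_convolution_and_or : Prop := ∀ (n : Int) (op : Int) (A : List Int) (B : List Int), Dom_subset_convolution_and_or n op A B → Pre_subset_convolution_and_or n op A B → Spec_subset_convolution_and_or n op A B (subset_convolution_and_or n op A B)

-- ===== LEMMAS AND PROOFS =====

-- the butterfly stage, as a pointwise map on functions
def gStep (orC inv : Bool) (bit : Nat) (f : Nat → Int) (m : Nat) : Int :=
  if pvHit orC bit m then (if inv then f m - f (m ^^^ bit) + pvM else f m + f (m ^^^ bit)) % pvM
  else f m

def gChain (orC inv : Bool) : Nat → (Nat → Int) → Nat → Int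
  | 0, f => f
  | k + 1, f => gStep orC inv (2 ^ k) (gChain orC inv k f)

-- proof-side mirror of the set of masks the chain at `m` sums over
def pvDl (orC : Bool) : Nat → Nat → List Nat
  | 0, m => [m]
  | k + 1, m =>
    if pvHit orC (2 ^ k) m then pvDl orC k m ++ pvDl orC k (m ^^^ 2 ^ k) else pvDl orC k m

lemma pvM_pos : (0 : Int) < pvM := by decide

lemma pvHit_testBit (orC : Bool) (i m : Nat) : pvHit orC (2 ^ i) m = (m.testBit i == orC) := by
  unfold pvHit
  rw [Nat.and_two_pow]
  have h2 : ((2 : Nat) ^ i != 0) = true := by simp [bne_iff_ne]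
  cases h : m.testBit i <;> simp [h2]

lemma pvHit_flip (orC : Bool) (i m : Nat) (h : pvHit orC (2 ^ i) m = true) :
    pvHit orC (2 ^ i) (m ^^^ 2 ^ i) = false := by
  rw [pvHit_testBit] at h ⊢
  rw [Nat.testBit_xor, Nat.testBit_two_pow_self]
  cases orC <;> cases hm : m.testBit i <;> simp_all

lemma pvFztStep_length (orC inv : Bool) (bit : Nat) (a : List Int) (m : Nat) :
    (pvFztStep orC inv bit a m).length = a.length := by
  unfold pvFztStep; split <;> simp

lemma getD_set_ne (a : List Int) (i j : Nat) (v : Int) (h : i ≠ j) :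
    (a.set i v).getD j 0 = a.getD j 0 := by
  simp [List.getD_eq_getElem?_getD, h]

lemma getD_set_self (a : List Int) (i : Nat) (v : Int) (h : i < a.length) :
    (a.set i v).getD i 0 = v := by
  simp [List.getD_eq_getElem?_getD, h]

-- one inner loop of pvFzt = gStep, pointwise below k
lemma stage_spec (orC inv : Bool) (i : Nat) (a : List Int) (k : Nat) (hk : k ≤ a.length) :
    ((List.range k).foldl (pvFztStep orC inv (2 ^ i)) a).length = a.length ∧
    (∀ m, k ≤ m → ((List.range k).foldl (pvFztStep orC inv (2 ^ i)) a).getD m 0 = a.getD m 0) ∧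
    (∀ m < k, ((List.range k).foldl (pvFztStep orC inv (2 ^ i)) a).getD m 0 =
      gStep orC inv (2 ^ i) (fun x => a.getD x 0) m) := by
  induction k with
  | zero => simp
  | succ k ih =>
    obtain ⟨ihlen, ihge, ihlt⟩ := ih (Nat.le_of_succ_le hk)
    rw [List.range_succ, List.foldl_append, List.foldl_cons, List.foldl_nil]
    set r := (List.range k).foldl (pvFztStep orC inv (2 ^ i)) a with hr
    have hrk : r.getD k 0 = a.getD k 0 := ihge k le_rfl
    by_cases hhit : pvHit orC (2 ^ i) k = true
    · have hrp : r.getD (k ^^^ 2 ^ i) 0 = a.getD (k ^^^ 2 ^ i) 0 := by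
        by_cases hp : k ≤ k ^^^ 2 ^ i
        · exact ihge _ hp
        · have := ihlt (k ^^^ 2 ^ i) (by omega)
          rw [this, gStep, pvHit_flip orC i k hhit]
          simp
      refine ⟨?_, ?_, ?_⟩
      · rw [pvFztStep_length, ihlen]
      · intro m hm
        rw [pvFztStep, if_pos hhit]
        rw [getD_set_ne _ _ _ _ (by omega)]
        exact ihge m (by omega)
      · intro m hm
        rcases Nat.lt_succ_iff_lt_or_eq.1 hm with hmk | rfl
        · rw [pvFztStep, if_pos hhit, getD_set_ne _ _ _ _ (by omega)]
          exact ihlt m hmk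
        · rw [pvFztStep, if_pos hhit, getD_set_self _ _ _ (by rw [ihlen]; omega),
            hrk, hrp, gStep, if_pos hhit]
          cases inv <;> simp [PySem.Int.mod_eq_emod_of_pos pvM_pos]
    · refine ⟨?_, ?_, ?_⟩
      · rw [pvFztStep, if_neg hhit, ihlen]
      · intro m hm
        rw [pvFztStep, if_neg hhit]
        exact ihge m (by omega)
      · intro m hm
        rcases Nat.lt_succ_iff_lt_or_eq.1 hm with hmk | rfl
        · rw [pvFztStep, if_neg hhit]
          exact ihlt m hmk
        · rw [pvFztStep, if_neg hhit, hrk, gStep, if_neg hhit]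

lemma pvFzt_aux (orC inv : Bool) (n : Nat) (a : List Int) (h : 2 ^ n ≤ a.length) :
    ∀ j ≤ n,
      ((List.range j).foldl
        (fun acc i => (List.range (2 ^ n)).foldl (pvFztStep orC inv (2 ^ i)) acc) a).length
        = a.length ∧
      ∀ m < 2 ^ n,
        ((List.range j).foldl
          (fun acc i => (List.range (2 ^ n)).foldl (pvFztStep orC inv (2 ^ i)) acc) a).getD m 0
          = gChain orC inv j (fun x => a.getD x 0) m := by
  intro j
  induction j with
  | zero => intro _; simp [gChain]
  | succ j ih =>
    intro hj
    obtain ⟨ihlen, ihm⟩ := ih (by omega)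
    rw [List.range_succ, List.foldl_append, List.foldl_cons, List.foldl_nil]
    set r := (List.range j).foldl
      (fun acc i => (List.range (2 ^ n)).foldl (pvFztStep orC inv (2 ^ i)) acc) a with hr
    obtain ⟨slen, _, slt⟩ := stage_spec orC inv j r (2 ^ n) (by omega)
    refine ⟨by rw [slen, ihlen], ?_⟩
    intro m hm
    have hbit : (2 : Nat) ^ j < 2 ^ n := Nat.pow_lt_pow_right (by omega) (by omega)
    have hm' : m ^^^ 2 ^ j < 2 ^ n := Nat.xor_lt_two_pow hm hbit
    rw [slt m hm]
    show gStep orC inv (2 ^ j) (fun x => r.getD x 0) m = _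
    rw [gChain, gStep, gStep, ihm m hm, ihm _ hm']

lemma pvFzt_length (orC inv : Bool) (n : Nat) (a : List Int) (h : 2 ^ n ≤ a.length) :
    (pvFzt orC n a inv).length = a.length :=
  (pvFzt_aux orC inv n a h n le_rfl).1

lemma pvFzt_getD (orC inv : Bool) (n : Nat) (a : List Int) (h : 2 ^ n ≤ a.length) :
    ∀ m < 2 ^ n, (pvFzt orC n a inv).getD m 0 = gChain orC inv n (fun x => a.getD x 0) m :=
  (pvFzt_aux orC inv n a h n le_rfl).2

-- elements of pvSubmasks are < 2^k
-- unfolding of the pvSubmasks fold, one bit at a time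
lemma pvSubmasks_succ (k b : Nat) :
    pvSubmasks (k + 1) b =
      if (b >>> k) &&& 1 != 0 then
        pvSubmasks k b ++ (pvSubmasks k b).map (fun t => t ||| 2 ^ k)
      else pvSubmasks k b := by
  unfold pvSubmasks
  rw [List.range_succ, List.foldl_append, List.foldl_cons, List.foldl_nil]

lemma shift_and_one (b i : Nat) : (b >>> i) &&& 1 = (b.testBit i).toNat := by
  rw [Nat.and_one_is_mod, Nat.shiftRight_eq_div_pow, Nat.toNat_testBit]

lemma pvSubmasks_lt (k b : Nat) : ∀ t ∈ pvSubmasks k b, t < 2 ^ k := by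
  induction k with
  | zero => intro t ht; simp [pvSubmasks] at ht; simp [ht]
  | succ k ih =>
    intro t ht
    rw [pvSubmasks_succ] at ht
    have hk : (2 : Nat) ^ k < 2 ^ (k + 1) := by
      have := Nat.pow_lt_pow_right (a := 2) (by omega) (Nat.lt_succ_self k); simpa using this
    split at ht
    · rcases List.mem_append.1 ht with h | h
      · exact lt_trans (ih t h) hk
      · rcases List.mem_map.1 h with ⟨u, hu, rfl⟩
        exact Nat.or_lt_two_pow (lt_trans (ih u hu) hk) hk
    · exact lt_trans (ih t ht) hk

lemma or_two_pow_eq_xor (t k : Nat) (h : t < 2 ^ k) : t ||| 2 ^ k = t ^^^ 2 ^ k := by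
  apply Nat.eq_of_testBit_eq
  intro j
  rw [Nat.testBit_or, Nat.testBit_xor, Nat.testBit_two_pow]
  by_cases hj : k = j
  · subst hj; rw [Nat.testBit_lt_two_pow h]; simp
  · simp [hj]

lemma pvDl_succ (orC : Bool) (k m : Nat) :
    pvDl orC (k + 1) m =
      if pvHit orC (2 ^ k) m then pvDl orC k m ++ pvDl orC k (m ^^^ 2 ^ k) else pvDl orC k m := rfl

-- the chain's index list is exactly B's region list
lemma pvDl_eq_region (orC : Bool) (k : Nat) (m b : Nat)
    (hb : ∀ i < k, b.testBit i = (m.testBit i == orC)) :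
    pvDl orC k m = (pvSubmasks k b).map (fun t => m ^^^ t) := by
  induction k generalizing m with
  | zero => simp [pvDl, pvSubmasks]
  | succ k ih =>
    have hhit : ((b >>> k) &&& 1 != 0) = pvHit orC (2 ^ k) m := by
      rw [shift_and_one, hb k (Nat.lt_succ_self k), pvHit_testBit]
      cases h : m.testBit k <;> cases orC <;> simp
    have hb' : ∀ i < k, b.testBit i = (m.testBit i == orC) := fun i hi => hb i (by omega)
    rw [pvDl_succ, pvSubmasks_succ, hhit]
    by_cases hc : pvHit orC (2 ^ k) m = true
    · rw [if_pos hc, if_pos hc, List.map_append, List.map_map]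
      congr 1
      · exact ih m hb'
      · have hbx : ∀ i < k, b.testBit i = ((m ^^^ 2 ^ k).testBit i == orC) := by
          intro i hi
          rw [Nat.testBit_xor, Nat.testBit_two_pow]
          have : ¬ k = i := by omega
          simp [this]
          exact hb' i hi
        rw [ih (m ^^^ 2 ^ k) hbx]
        apply List.map_congr_left
        intro t ht
        have htk := pvSubmasks_lt k b t ht
        show m ^^^ 2 ^ k ^^^ t = m ^^^ (t ||| 2 ^ k)
        rw [or_two_pow_eq_xor t k htk, Nat.xor_assoc, Nat.xor_comm (2 ^ k) t]
    · rw [if_neg hc, if_neg hc]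
      exact ih m hb'

-- the canonical base mask B's region uses
def pvB (orC : Bool) (k m : Nat) : Nat := if orC then m else (2 ^ k - 1) ^^^ m

lemma pvB_spec (orC : Bool) (k m : Nat) :
    ∀ i < k, (pvB orC k m).testBit i = (m.testBit i == orC) := by
  intro i hi
  cases orC <;> simp [pvB, Nat.testBit_xor, Nat.testBit_two_pow_sub_one, hi]

lemma pvDl_mem (orC : Bool) (k m j : Nat) (hj : j ∈ pvDl orC k m) :
    ∃ t, t < 2 ^ k ∧ j = m ^^^ t := by
  rw [pvDl_eq_region orC k m (pvB orC k m) (pvB_spec orC k m)] at hj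
  rcases List.mem_map.1 hj with ⟨t, ht, rfl⟩
  exact ⟨t, pvSubmasks_lt k _ t ht, rfl⟩

lemma pvDl_high (orC : Bool) (k m : Nat) :
    ∀ j ∈ pvDl orC k m, ∀ i, k ≤ i → j.testBit i = m.testBit i := by
  intro j hj i hik
  rcases pvDl_mem orC k m j hj with ⟨t, hlt, rfl⟩
  rw [Nat.testBit_xor,
    Nat.testBit_eq_false_of_lt (lt_of_lt_of_le hlt (Nat.pow_le_pow_right (by omega) hik))]
  simp

lemma pvPopcount_def (x : Nat) : pvPopcount x = x % 2 + pvPopcount (x / 2) := by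
  have h0 : pvPopcount 0 = 0 := by rw [pvPopcount]; simp
  rw [pvPopcount]
  split
  · rename_i h; subst h; simp [h0]
  · rfl

lemma pvPopcount_xor (k x : Nat) (h : x.testBit k = false) :
    pvPopcount (x ^^^ 2 ^ k) = pvPopcount x + 1 := by
  induction k generalizing x with
  | zero =>
    have hx2 : x % 2 = 0 := by
      have := Nat.toNat_testBit x 0
      rw [h] at this; simpa using this.symm
    have e1 : (x ^^^ 2 ^ 0) % 2 = 1 := by
      rw [← Nat.and_one_is_mod, Nat.and_xor_distrib_right, Nat.and_one_is_mod,
        Nat.and_one_is_mod, hx2]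
      rfl
    have e2 : (x ^^^ 2 ^ 0) / 2 = x / 2 := by
      rw [← Nat.shiftRight_one, Nat.shiftRight_xor_distrib, Nat.shiftRight_one,
        Nat.shiftRight_one]
      norm_num
    rw [pvPopcount_def (x ^^^ 2 ^ 0), e1, e2, pvPopcount_def x, hx2]
    omega
  | succ k ih =>
    have e1 : (x ^^^ 2 ^ (k + 1)) % 2 = x % 2 := by
      rw [← Nat.and_one_is_mod, Nat.and_xor_distrib_right, Nat.and_one_is_mod,
        Nat.and_one_is_mod (2 ^ (k + 1)), Nat.pow_succ, Nat.mul_mod_left]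
      simp
    have e2 : (x ^^^ 2 ^ (k + 1)) / 2 = x / 2 ^^^ 2 ^ k := by
      rw [← Nat.shiftRight_one, Nat.shiftRight_xor_distrib, Nat.shiftRight_one,
        Nat.shiftRight_one, Nat.pow_succ, Nat.mul_div_cancel _ (by omega : 0 < 2)]
    have hk : (x / 2).testBit k = false := by rw [Nat.testBit_div_two]; exact h
    rw [pvPopcount_def (x ^^^ 2 ^ (k + 1)), e1, e2, ih _ hk, pvPopcount_def x]
    omega

-- forward chain ≡ plain sum over the region
lemma emod_modEq_self (a : Int) : a % pvM ≡ a [ZMOD pvM] := Int.emod_emod_of_dvd a dvd_rfl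

lemma sum_map_neg (l : List Nat) (g : Nat → Int) :
    (l.map (fun j => -g j)).sum = -(l.map g).sum := by
  induction l with
  | nil => simp
  | cons a l ih => simp [ih]; ring

lemma gChain_fwd (orC : Bool) (k : Nat) (f : Nat → Int) (m : Nat) :
    gChain orC false k f m ≡ ((pvDl orC k m).map f).sum [ZMOD pvM] := by
  induction k generalizing m with
  | zero => simp [gChain, pvDl]
  | succ k ih =>
    show gStep orC false (2 ^ k) (gChain orC false k f) m ≡ _ [ZMOD pvM]
    rw [gStep, pvDl_succ]
    by_cases hc : pvHit orC (2 ^ k) m = true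
    · rw [if_pos hc, if_pos hc, List.map_append, List.sum_append]
      calc (if false = true then _ - _ + pvM
            else gChain orC false k f m + gChain orC false k f (m ^^^ 2 ^ k)) % pvM
          ≡ gChain orC false k f m + gChain orC false k f (m ^^^ 2 ^ k) [ZMOD pvM] := by
            simp only [Bool.false_eq_true, if_false]
            exact emod_modEq_self _
        _ ≡ ((pvDl orC k m).map f).sum + ((pvDl orC k (m ^^^ 2 ^ k)).map f).sum [ZMOD pvM] :=
            Int.ModEq.add (ih m) (ih (m ^^^ 2 ^ k))
    · rw [if_neg hc, if_neg hc]
      exact ih m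

-- inverse chain ≡ popcount-signed sum over the region
lemma gChain_inv (orC : Bool) (k : Nat) (f : Nat → Int) (m : Nat) :
    gChain orC true k f m ≡
      ((pvDl orC k m).map
        (fun j => if pvPopcount (m ^^^ j) % 2 = 0 then f j else -f j)).sum [ZMOD pvM] := by
  induction k generalizing m with
  | zero =>
    have h0 : pvPopcount 0 = 0 := by rw [pvPopcount]; simp
    simp [gChain, pvDl, Nat.xor_self, h0]
  | succ k ih =>
    show gStep orC true (2 ^ k) (gChain orC true k f) m ≡ _ [ZMOD pvM]
    rw [gStep, pvDl_succ]
    by_cases hc : pvHit orC (2 ^ k) m = true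
    · rw [if_pos hc, if_pos hc, List.map_append, List.sum_append]
      have hflip :
          (pvDl orC k (m ^^^ 2 ^ k)).map
              (fun j => if pvPopcount (m ^^^ j) % 2 = 0 then f j else -f j)
            = (pvDl orC k (m ^^^ 2 ^ k)).map
              (fun j => -(if pvPopcount (m ^^^ 2 ^ k ^^^ j) % 2 = 0 then f j else -f j)) := by
        apply List.map_congr_left
        intro j hj
        have hbit : (m ^^^ 2 ^ k ^^^ j).testBit k = false := by
          rw [Nat.testBit_xor, pvDl_high orC k (m ^^^ 2 ^ k) j hj k le_rfl]
          simp
        have hxj : m ^^^ j = (m ^^^ 2 ^ k ^^^ j) ^^^ 2 ^ k := by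
          rw [Nat.xor_assoc (m ^^^ 2 ^ k) j (2 ^ k), Nat.xor_comm j (2 ^ k),
            ← Nat.xor_assoc (m ^^^ 2 ^ k) (2 ^ k) j, Nat.xor_assoc m (2 ^ k) (2 ^ k),
            Nat.xor_self, Nat.xor_zero]
        have hpc : pvPopcount (m ^^^ j) = pvPopcount (m ^^^ 2 ^ k ^^^ j) + 1 := by
          rw [hxj]; exact pvPopcount_xor k _ hbit
        rcases Nat.even_or_odd (pvPopcount (m ^^^ 2 ^ k ^^^ j)) with hp | hp
        · have h1 : pvPopcount (m ^^^ 2 ^ k ^^^ j) % 2 = 0 := Nat.even_iff.1 hp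
          have h2 : ¬ pvPopcount (m ^^^ j) % 2 = 0 := by omega
          simp [h1, h2]
        · have h1 : ¬ pvPopcount (m ^^^ 2 ^ k ^^^ j) % 2 = 0 := by
            rw [Nat.odd_iff.1 hp]; omega
          have h2 : pvPopcount (m ^^^ j) % 2 = 0 := by
            have := Nat.odd_iff.1 hp; omega
          simp [h1, h2]
      rw [hflip, sum_map_neg]
      simp only [if_true]
      refine (emod_modEq_self _).trans ?_
      have hM0 : (pvM : Int) ≡ 0 [ZMOD pvM] := by unfold Int.ModEq; simp
      have h3 := (((ih m).sub (ih (m ^^^ 2 ^ k))).add hM0)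
      simpa [sub_eq_add_neg] using h3
    · rw [if_neg hc, if_neg hc]
      exact ih m

lemma gChain_inv_range (orC : Bool) (k : Nat) (f : Nat → Int)
    (hf : ∀ j, 0 ≤ f j ∧ f j < pvM) (m : Nat) :
    0 ≤ gChain orC true k f m ∧ gChain orC true k f m < pvM := by
  induction k generalizing m with
  | zero => exact hf m
  | succ k ih =>
    show 0 ≤ gStep orC true (2 ^ k) (gChain orC true k f) m ∧
      gStep orC true (2 ^ k) (gChain orC true k f) m < pvM
    rw [gStep]
    by_cases hc : pvHit orC (2 ^ k) m = true
    · rw [if_pos hc]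
      exact ⟨Int.emod_nonneg _ (ne_of_gt pvM_pos), Int.emod_lt_of_pos _ pvM_pos⟩
    · rw [if_neg hc]
      exact ih m

lemma region_eq_dl (orC : Bool) (op : Int) (hop : (op = 1) ↔ (orC = true)) (n m : Nat) :
    pvRegion n op (2 ^ n - 1) m = pvDl orC n m := by
  rw [pvDl_eq_region orC n m (pvB orC n m) (pvB_spec orC n m)]
  cases orC <;> simp [pvRegion, pvB, hop]

lemma pl_bounds (size : Nat) (g : Nat → Int) :
    ∀ j, 0 ≤ ((List.range size).map (fun m => PySem.Int.mod (g m) pvM)).getD j 0 ∧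
         ((List.range size).map (fun m => PySem.Int.mod (g m) pvM)).getD j 0 < pvM := by
  intro j
  by_cases hj : j < size
  · rw [PySem.List.getD_map_range _ _ _ _ hj]
    exact ⟨PySem.Int.mod_nonneg _ pvM_pos, PySem.Int.mod_lt _ pvM_pos⟩
  · rw [List.getD_eq_default _ _ (by simpa using hj)]
    exact ⟨le_refl 0, pvM_pos⟩

lemma core (orC : Bool) (n op : Int) (hop : (op = 1) ↔ (orC = true)) (A B : List Int)
    (hA : 2 ^ n.toNat ≤ A.length) (hB : 2 ^ n.toNat ≤ B.length) :
    subset_convolution_and_or n op A B = subset_convolution_and_or_alt n op A B := by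
  have hif : ∀ (X : List Int) (inv : Bool),
      (if op = 1 then pvFzt true n.toNat X inv else pvFzt false n.toNat X inv)
        = pvFzt orC n.toNat X inv := by
    intro X inv
    cases orC
    · rw [if_neg (fun h => by simpa using hop.mp h)]
    · rw [if_pos (hop.mpr rfl)]
  unfold subset_convolution_and_or subset_convolution_and_or_alt
  simp only [hif]
  set nn := n.toNat with hnn
  set size := 2 ^ nn with hsize
  have hreg : ∀ m : Nat, pvRegion nn op (size - 1) m = pvDl orC nn m :=
    fun m => region_eq_dl orC op hop nn m
  have hchainA : ∀ i < size, (pvFzt orC nn A false).getD i 0 ≡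
      ((pvRegion nn op (size - 1) i).map (fun j => A.getD j 0)).sum [ZMOD pvM] := by
    intro i hi
    rw [hreg i, pvFzt_getD orC false nn A hA i hi]
    exact gChain_fwd orC nn _ i
  have hchainB : ∀ i < size, (pvFzt orC nn B false).getD i 0 ≡
      ((pvRegion nn op (size - 1) i).map (fun j => B.getD j 0)).sum [ZMOD pvM] := by
    intro i hi
    rw [hreg i, pvFzt_getD orC false nn B hB i hi]
    exact gChain_fwd orC nn _ i
  have hCP : (List.range size).map (fun i =>
        PySem.Int.mod ((pvFzt orC nn A false).getD i 0 * (pvFzt orC nn B false).getD i 0) pvM)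
      = (List.range size).map (fun m2 => PySem.Int.mod
          (((List.range size).map (fun m => PySem.Int.mod
              (((pvRegion nn op (size - 1) m).map (fun j => A.getD j 0)).sum) pvM)).getD m2 0 *
           ((List.range size).map (fun m => PySem.Int.mod
              (((pvRegion nn op (size - 1) m).map (fun j => B.getD j 0)).sum) pvM)).getD m2 0)
          pvM) := by
    apply List.map_congr_left
    intro i hi
    have hi' : i < size := List.mem_range.1 hi
    rw [PySem.List.getD_map_range _ _ _ _ hi', PySem.List.getD_map_range _ _ _ _ hi',
      PySem.Int.mod_eq_emod_of_pos pvM_pos, PySem.Int.mod_eq_emod_of_pos pvM_pos]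
    have h1 := hchainA i hi'
    have h2 := hchainB i hi'
    have h1' : PySem.Int.mod (((pvRegion nn op (size - 1) i).map (fun j => A.getD j 0)).sum) pvM
        ≡ ((pvRegion nn op (size - 1) i).map (fun j => A.getD j 0)).sum [ZMOD pvM] := by
      rw [PySem.Int.mod_eq_emod_of_pos pvM_pos]; exact emod_modEq_self _
    have h2' : PySem.Int.mod (((pvRegion nn op (size - 1) i).map (fun j => B.getD j 0)).sum) pvM
        ≡ ((pvRegion nn op (size - 1) i).map (fun j => B.getD j 0)).sum [ZMOD pvM] := by
      rw [PySem.Int.mod_eq_emod_of_pos pvM_pos]; exact emod_modEq_self _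
    exact (h1.mul h2).trans (h1'.mul h2').symm
  rw [hCP]
  set Pl := (List.range size).map (fun m2 => PySem.Int.mod
          (((List.range size).map (fun m => PySem.Int.mod
              (((pvRegion nn op (size - 1) m).map (fun j => A.getD j 0)).sum) pvM)).getD m2 0 *
           ((List.range size).map (fun m => PySem.Int.mod
              (((pvRegion nn op (size - 1) m).map (fun j => B.getD j 0)).sum) pvM)).getD m2 0)
          pvM) with hPl
  have hPb : ∀ j, 0 ≤ Pl.getD j 0 ∧ Pl.getD j 0 < pvM := by
    rw [hPl]; exact pl_bounds size _
  have hlen : Pl.length = size := by rw [hPl]; simp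
  apply List.ext_getElem
  · rw [pvFzt_length orC true nn Pl (le_of_eq hlen.symm), hlen]
    simp
  · intro i h1 h2
    have hi : i < size := by simpa using h2
    rw [← List.getD_eq_getElem _ 0 h1, ← List.getD_eq_getElem _ 0 h2,
      PySem.List.getD_map_range _ _ _ _ hi,
      pvFzt_getD orC true nn Pl (le_of_eq hlen.symm) i hi, hreg i]
    have hfun : (fun (acc : Int) (j : Nat) =>
          if pvPopcount (i ^^^ j) % 2 = 0 then acc + Pl.getD j 0 else acc - Pl.getD j 0)
        = fun acc j => acc + (if pvPopcount (i ^^^ j) % 2 = 0 then Pl.getD j 0 else -Pl.getD j 0) := by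
      funext acc j; split <;> ring
    rw [hfun, PySem.List.foldl_add, PySem.Int.mod_eq_emod_of_pos pvM_pos, zero_add]
    have hr := gChain_inv_range orC nn (fun x => Pl.getD x 0) (fun j => hPb j) i
    rw [← Int.emod_eq_of_lt hr.1 hr.2]
    exact gChain_inv orC nn (fun x => Pl.getD x 0) i

-- ===== VERDICT (by name: the statement is the Claim_ definition above) =====
theorem subset_convolution_and_or_spec : Claim_equal_subset_convolution_and_or := by
  intro n op A B _ hpre
  obtain ⟨hn, hA, hB⟩ := hpre
  unfold Spec_subset_convolution_and_or
  by_cases hop : op = 1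
  · exact core true n op (by simp [hop]) A B hA hB
  · exact core false n op (by simp [hop]) A B hA hB
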